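-- pv_equiv track=rewrite | github.com/apostolovbg/devcovenant | devcovenant/core/install.py | _update_generic_config_text
-- ===== SOURCE A (Python) =====
-- def _update_generic_config_text(
--     text: str, is_generic: bool
-- ) -> tuple[str, bool]:
--     """Update the install.generic_config flag inside config text."""
--     lines = text.splitlines()
--     updated_lines: list[str] = []
--     found_install = False
--     found_generic = False
--     index = 0
--     generic_value = "true" if is_generic else "false"
--     while index < len(lines):
--         line = lines[index]
--         if line.strip().startswith("install:"):
--             found_install = True
--             updated_lines.append(line.rstrip())
--             index += 1
--             while index < len(lines):
--                 next_line = lines[index]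
--                 if next_line.startswith("  "):
--                     if next_line.strip().startswith("generic_config:"):
--                         updated_lines.append(
--                             f"  generic_config: {generic_value}"
--                         )
--                         found_generic = True
--                     else:
--                         updated_lines.append(next_line.rstrip())
--                     index += 1
--                     continue
--                 if not next_line.strip():
--                     updated_lines.append(next_line.rstrip())
--                     index += 1
--                     continue
--                 break
--             if not found_generic:
--                 updated_lines.append(f"  generic_config: {generic_value}")
--             continue
--         updated_lines.append(line.rstrip())
--         index += 1
--     if not found_install:
--         if updated_lines and updated_lines[-1].strip():
--             updated_lines.append("")
--         updated_lines.append("install:")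
--         updated_lines.append(f"  generic_config: {generic_value}")
--     updated = "\n".join(updated_lines).rstrip() + "\n"
--     return updated, updated != text
-- ===== SOURCE B (Python) =====
-- def _update_generic_config_text(text, is_generic):
--     """Update the install.generic_config flag inside config text
--     (single flat pass with an in_install state flag)."""
--     value = "true" if is_generic else "false"
--     fallback = f"  generic_config: {value}"
--     out = []
--     in_install = False
--     found_install = False
--     found_generic = False
--     for line in text.splitlines():
--         if in_install and line.startswith("  "):
--             if line.strip().startswith("generic_config:"):
--                 out.append(fallback)
--                 found_generic = True
--             else:
--                 out.append(line.rstrip())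
--             continue
--         if in_install and not line.strip():
--             out.append(line.rstrip())
--             continue
--         # leaving an install block: flush the fallback before handling this line
--         if in_install and not found_generic:
--             out.append(fallback)
--         if line.strip().startswith("install:"):
--             found_install = True
--             in_install = True
--             out.append(line.rstrip())
--         else:
--             in_install = False
--             out.append(line.rstrip())
--     if in_install and not found_generic:
--         out.append(fallback)
--     if not found_install:
--         if out and out[-1].strip():
--             out.append("")
--         out.append("install:")
--         out.append(fallback)
--     updated = "\n".join(out).rstrip() + "\n"
--     return updated, updated != text
-- ===== Notes on version B (the rewrite author's own statement) =====
-- stated objective: simpler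
-- what changed: Replaces A's nested while loops with index re-processing by a single flat for-loop over the lines carrying an in_install boolean state, flushing the fallback generic_config line when a block ends.
import Mathlib
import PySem

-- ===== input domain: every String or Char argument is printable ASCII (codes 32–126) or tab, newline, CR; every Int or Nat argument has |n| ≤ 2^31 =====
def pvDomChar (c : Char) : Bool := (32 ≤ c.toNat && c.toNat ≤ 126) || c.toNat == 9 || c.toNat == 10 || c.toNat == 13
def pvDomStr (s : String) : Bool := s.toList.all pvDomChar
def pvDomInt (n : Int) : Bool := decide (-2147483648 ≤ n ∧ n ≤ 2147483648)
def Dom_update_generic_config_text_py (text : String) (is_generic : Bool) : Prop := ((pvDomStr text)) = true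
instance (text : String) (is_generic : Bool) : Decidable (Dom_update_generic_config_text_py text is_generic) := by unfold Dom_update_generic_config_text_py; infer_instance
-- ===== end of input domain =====

-- B replaces A's nested while loops (with index re-processing) by one flat fold carrying an
-- in_install state flag: same return value, simpler control flow (objective: simpler).

-- ===== PORT A =====
-- the "  generic_config: <value>" line
def pvGenLine (v : String) : String := "  generic_config: " ++ v

-- A's inner while loop: consumes block lines, returns (updated acc, remaining lines, found_generic)
def pvAInner (v : String) : List String → List String → Bool → List String × List String × Bool
  | [], acc, fg => (acc, [], fg)
  | l :: t, acc, fg =>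
    if PySem.Str.startswith l "  " then
      if PySem.Str.startswith (PySem.Str.strip l) "generic_config:" then
        pvAInner v t (acc ++ [pvGenLine v]) true
      else
        pvAInner v t (acc ++ [PySem.Str.rstrip l]) fg
    else if PySem.Str.strip l == "" then
      pvAInner v t (acc ++ [PySem.Str.rstrip l]) fg
    else
      (acc, l :: t, fg)

-- termination measure for the outer loop (the inner loop only consumes lines)
theorem pvAInner_len (v : String) (ls acc : List String) (fg : Bool) :
    (pvAInner v ls acc fg).2.1.length ≤ ls.length := by
  induction ls generalizing acc fg with
  | nil => simp [pvAInner]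
  | cons l t ih =>
    simp only [pvAInner]
    split_ifs <;> first
      | exact le_trans (ih _ _) (by simp)
      | simp

-- A's outer while loop: returns (updated_lines, found_install, found_generic)
def pvAOuter (v : String) (ls acc : List String) (fi fg : Bool) : List String × Bool × Bool :=
  match ls with
  | [] => (acc, fi, fg)
  | l :: t =>
    if PySem.Str.startswith (PySem.Str.strip l) "install:" then
      pvAOuter v (pvAInner v t (acc ++ [PySem.Str.rstrip l]) fg).2.1
        (if (pvAInner v t (acc ++ [PySem.Str.rstrip l]) fg).2.2 then
           (pvAInner v t (acc ++ [PySem.Str.rstrip l]) fg).1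
         else (pvAInner v t (acc ++ [PySem.Str.rstrip l]) fg).1 ++ [pvGenLine v])
        true (pvAInner v t (acc ++ [PySem.Str.rstrip l]) fg).2.2
    else
      pvAOuter v t (acc ++ [PySem.Str.rstrip l]) fi fg
termination_by ls.length
decreasing_by
  · have := pvAInner_len v t (acc ++ [PySem.Str.rstrip l]) fg
    simp; omega
  · simp

-- the final "not found_install" patch and "\n".join(...).rstrip() + "\n" of A
def pvAFinish (v text : String) (r : List String × Bool × Bool) : String × Bool :=
  let ul := if r.2.1 then r.1
    else (if r.1 ≠ [] ∧ PySem.Str.strip (r.1.getLastD "") ≠ "" then r.1 ++ [""] else r.1)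
      ++ ["install:", pvGenLine v]
  let updated := PySem.Str.rstrip (PySem.Str.join "\n" ul) ++ "\n"
  (updated, decide (updated ≠ text))

def update_generic_config_text_py (text : String) (is_generic : Bool) : String × Bool :=
  pvAFinish (if is_generic then "true" else "false") text
    (pvAOuter (if is_generic then "true" else "false") (PySem.Str.splitlines text) [] false false)

-- ===== PORT B =====
-- one step of B's flat loop; state = (out, in_install, found_install, found_generic)
def pvBStep (v : String) (s : List String × Bool × Bool × Bool) (l : String) :
    List String × Bool × Bool × Bool :=
  let (acc, inI, fi, fg) := s
  if inI && PySem.Str.startswith l "  " then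
    if PySem.Str.startswith (PySem.Str.strip l) "generic_config:" then
      (acc ++ [pvGenLine v], true, fi, true)
    else
      (acc ++ [PySem.Str.rstrip l], true, fi, fg)
  else if inI && (PySem.Str.strip l == "") then
    (acc ++ [PySem.Str.rstrip l], true, fi, fg)
  else
    -- leaving an install block: flush the fallback before handling this line
    let acc' := if inI && !fg then acc ++ [pvGenLine v] else acc
    if PySem.Str.startswith (PySem.Str.strip l) "install:" then
      (acc' ++ [PySem.Str.rstrip l], true, true, fg)
    else
      (acc' ++ [PySem.Str.rstrip l], false, fi, fg)

-- B's tail: flush the fallback if still inside a block, patch if no install:, join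
def pvBFinish (v text : String) (s : List String × Bool × Bool × Bool) : String × Bool :=
  let out := if s.2.1 && !s.2.2.2 then s.1 ++ [pvGenLine v] else s.1
  let ul := if s.2.2.1 then out
    else (if out ≠ [] ∧ PySem.Str.strip (out.getLastD "") ≠ "" then out ++ [""] else out)
      ++ ["install:", pvGenLine v]
  let updated := PySem.Str.rstrip (PySem.Str.join "\n" ul) ++ "\n"
  (updated, decide (updated ≠ text))

def update_generic_config_text_py_alt (text : String) (is_generic : Bool) : String × Bool :=
  pvBFinish (if is_generic then "true" else "false") text
    (List.foldl (pvBStep (if is_generic then "true" else "false"))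
      ([], false, false, false) (PySem.Str.splitlines text))

-- ===== PRECONDITION & SPEC =====
def Spec_update_generic_config_text_py (text : String) (is_generic : Bool) (out : String × Bool) : Prop := out = update_generic_config_text_py_alt text is_generic
instance (text : String) (is_generic : Bool) (out : String × Bool) : Decidable (Spec_update_generic_config_text_py text is_generic out) := by unfold Spec_update_generic_config_text_py; infer_instance

-- ===== CLAIM (what is proved, stated in full; the proofs are below) =====
def Claim_equal_update_generic_config_text_py : Prop := ∀ (text : String) (is_generic : Bool), Dom_update_generic_config_text_py text is_generic → Spec_update_generic_config_text_py text is_generic (update_generic_config_text_py text is_generic)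

-- ===== LEMMAS AND PROOFS =====

-- B's fold, started inside an install block, mirrors A's inner loop and then (if the block
-- ended on a non-indented non-blank line) resumes outside the block on the remaining lines.
theorem pvB_fold_inI (v : String) : ∀ (ls acc : List String) (fi fg : Bool),
    List.foldl (pvBStep v) (acc, true, fi, fg) ls =
      if (pvAInner v ls acc fg).2.1 = [] then
        ((pvAInner v ls acc fg).1, true, fi, (pvAInner v ls acc fg).2.2)
      else
        List.foldl (pvBStep v)
          ((if (pvAInner v ls acc fg).2.2 then (pvAInner v ls acc fg).1
            else (pvAInner v ls acc fg).1 ++ [pvGenLine v]), false, fi,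
           (pvAInner v ls acc fg).2.2)
          (pvAInner v ls acc fg).2.1 := by
  intro ls
  induction ls with
  | nil => intro acc fi fg; simp [pvAInner]
  | cons l t ih =>
    intro acc fi fg
    by_cases h1 : PySem.Chars.startswith l.toList [' ', ' '] = true
    · by_cases h2 : PySem.Chars.startswith (PySem.Chars.strip l.toList)
        ['g','e','n','e','r','i','c','_','c','o','n','f','i','g',':'] = true
      · simp [pvAInner, pvBStep, h1, h2, ih]
      · simp [pvAInner, pvBStep, h1, h2, ih]
    · by_cases h2 : PySem.Str.strip l = ""
      · simp [pvAInner, pvBStep, h1, h2, ih]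
      · have hstep : pvBStep v (acc, true, fi, fg) l
            = pvBStep v ((if fg then acc else acc ++ [pvGenLine v]), false, fi, fg) l := by
          cases fg <;> simp [pvBStep, h1, h2]
        simp [pvAInner, h1, h2, List.foldl_cons, hstep]

-- the outer loop on no lines
theorem pvAOuter_nil (v : String) (acc : List String) (fi fg : Bool) :
    pvAOuter v [] acc fi fg = (acc, fi, fg) := by
  rw [pvAOuter]

-- A's outer loop equals B's fold started outside a block, up to the final fallback flush.
set_option maxHeartbeats 1600000 in
theorem pvAOuter_eq_fold (v : String) : ∀ (n : Nat) (ls acc : List String) (fi fg : Bool),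
    ls.length ≤ n →
    pvAOuter v ls acc fi fg =
      ((if (List.foldl (pvBStep v) (acc, false, fi, fg) ls).2.1 &&
           !(List.foldl (pvBStep v) (acc, false, fi, fg) ls).2.2.2 then
          (List.foldl (pvBStep v) (acc, false, fi, fg) ls).1 ++ [pvGenLine v]
        else (List.foldl (pvBStep v) (acc, false, fi, fg) ls).1),
       (List.foldl (pvBStep v) (acc, false, fi, fg) ls).2.2.1,
       (List.foldl (pvBStep v) (acc, false, fi, fg) ls).2.2.2) := by
  intro n
  induction n with
  | zero =>
    intro ls acc fi fg h
    have hnil : ls = [] := List.eq_nil_of_length_eq_zero (Nat.le_zero.mp h)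
    subst hnil
    simp [pvAOuter_nil]
  | succ n ih =>
    intro ls acc fi fg h
    match ls with
    | [] => simp [pvAOuter_nil]
    | l :: t =>
      rw [pvAOuter]
      by_cases hh : PySem.Str.startswith (PySem.Str.strip l) "install:" = true
      · have hh2 : PySem.Chars.startswith (PySem.Chars.strip l.toList)
            ['i','n','s','t','a','l','l',':'] = true := by simpa using hh
        rw [if_pos hh]
        have hstep : List.foldl (pvBStep v) (acc, false, fi, fg) (l :: t)
            = List.foldl (pvBStep v) (acc ++ [PySem.Str.rstrip l], true, true, fg) t := by
          rw [List.foldl_cons]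
          congr 1
          simp [pvBStep, hh2]
        rw [hstep, pvB_fold_inI]
        rcases hE : pvAInner v t (acc ++ [PySem.Str.rstrip l]) fg with ⟨ra, rrest, rfg⟩
        cases rrest with
        | nil =>
          dsimp only
          rw [pvAOuter_nil, if_pos rfl]
          cases rfg <;> simp
        | cons x xs =>
          have hx : (x :: xs).length ≤ n := by
            have hlen := pvAInner_len v t (acc ++ [PySem.Str.rstrip l]) fg
            rw [hE] at hlen
            simp only [List.length_cons] at h hlen ⊢
            omega
          have hih := ih (x :: xs) (if rfg then ra else ra ++ [pvGenLine v]) true rfg hx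
          dsimp only
          rw [if_neg (List.cons_ne_nil x xs)]
          exact hih
      · have hh2 : ¬ PySem.Chars.startswith (PySem.Chars.strip l.toList)
            ['i','n','s','t','a','l','l',':'] = true := by simpa using hh
        rw [if_neg hh]
        have hstep : List.foldl (pvBStep v) (acc, false, fi, fg) (l :: t)
            = List.foldl (pvBStep v) (acc ++ [PySem.Str.rstrip l], false, fi, fg) t := by
          rw [List.foldl_cons]
          congr 1
          simp [pvBStep, hh2]
        rw [hstep]
        exact ih t _ fi fg (by simp only [List.length_cons] at h; omega)

-- the two tails agree once the fold's final state is flushed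
theorem pvFinish_eq (v text : String) (s : List String × Bool × Bool × Bool) :
    pvAFinish v text
      ((if s.2.1 && !s.2.2.2 then s.1 ++ [pvGenLine v] else s.1), s.2.2.1, s.2.2.2)
      = pvBFinish v text s := rfl

-- ===== VERDICT (by name: the statement is the Claim_ definition above) =====
theorem update_generic_config_text_py_spec : Claim_equal_update_generic_config_text_py := by
  intro text is_generic _
  unfold Spec_update_generic_config_text_py
  unfold update_generic_config_text_py update_generic_config_text_py_alt
  rw [pvAOuter_eq_fold _ (PySem.Str.splitlines text).length _ _ _ _ le_rfl, pvFinish_eq]
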